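-- pv_equiv track=rewrite | github.com/46112/Coding-Chanllenges | Programmers/LV2_주식가격.py | solution
-- ===== SOURCE A (Python) =====
-- def solution(prices):
--     answer = [0] * len(prices)
--     last_time = len(prices) - 1
--     stack = []
--
--     for cur_time, cur_price in enumerate(prices):
--         while stack and stack[-1][1] > cur_price:
--             past_time, _ = stack.pop() # 해당 시점의 가격은 현재 시점에서 떨어진다
--             answer[past_time] = cur_time - past_time
--         stack.append((cur_time, cur_price))
--
--     for time, _ in stack:#stack에는 끝까지 하락하지 않은 가격들만 남아있다
--         answer[time] = last_time - time
--
--     return answer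
-- ===== SOURCE B (Python) =====
-- def solution(prices):
--     answer = []
--     for i, p in enumerate(prices):
--         days = 0
--         for q in prices[i + 1:]:
--             days += 1
--             if q < p:
--                 break
--         answer.append(days)
--     return answer
-- ===== Notes on version B (the rewrite author's own statement) =====
-- stated objective: simpler
-- what changed: Replaces the monotonic stack with pop-time back-writes into a preallocated array by a direct per-index forward scan that counts days until the first strictly lower price, appending each count.
import Mathlib
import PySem

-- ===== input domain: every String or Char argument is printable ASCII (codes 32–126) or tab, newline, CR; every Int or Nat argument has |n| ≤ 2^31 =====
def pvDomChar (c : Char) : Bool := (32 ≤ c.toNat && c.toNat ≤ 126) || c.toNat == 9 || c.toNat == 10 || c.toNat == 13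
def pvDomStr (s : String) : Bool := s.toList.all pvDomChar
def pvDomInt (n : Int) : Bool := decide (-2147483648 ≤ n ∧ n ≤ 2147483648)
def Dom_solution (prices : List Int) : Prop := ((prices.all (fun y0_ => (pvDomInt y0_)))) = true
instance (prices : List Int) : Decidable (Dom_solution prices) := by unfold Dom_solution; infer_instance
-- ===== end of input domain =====

-- B replaces A's monotonic stack (with pop-time back-writes into a preallocated
-- array) by a plain per-index forward scan counting days until the first strictly
-- lower price; objective: simpler (B is O(n^2) vs A's O(n), not faster).

-- ===== PORT A =====
-- the inner `while stack and stack[-1][1] > cur_price` loop; the stack is kept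
-- head-first (head = Python's stack[-1]); `answer[past_time] = cur_time - past_time`
def popLoop (stack : List (Nat × Int)) (answer : List Int) (t : Nat) (p : Int) :
    List (Nat × Int) × List Int :=
  match stack with
  | [] => ([], answer)
  | (pt, pp) :: rest =>
      if p < pp then popLoop rest (answer.set pt ((t : Int) - (pt : Int))) t p
      else ((pt, pp) :: rest, answer)

-- `for cur_time, cur_price in enumerate(prices)`: the counter t is the enumerate index
def aloop (t : Nat) (rem : List Int) (stack : List (Nat × Int)) (answer : List Int) :
    List (Nat × Int) × List Int :=
  match rem with
  | [] => (stack, answer)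
  | p :: rest =>
      let sa := popLoop stack answer t p
      aloop (t + 1) rest ((t, p) :: sa.1) sa.2

def solution (prices : List Int) : List Int :=
  let n := prices.length
  -- answer = [0] * len(prices); last_time = len(prices) - 1; stack = []
  let sa := aloop 0 prices [] (List.replicate n (0 : Int))
  -- `for time, _ in stack: answer[time] = last_time - time` iterates bottom-to-top,
  -- i.e. the reverse of our head-first stack
  sa.1.reverse.foldl (fun a x => a.set x.1 ((n : Int) - 1 - (x.1 : Int))) sa.2

-- ===== PORT B =====
-- inner loop: `days = 0; for q in prices[i+1:]: days += 1; if q < p: break`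
def scanB (p : Int) (rest : List Int) (days : Int) : Int :=
  match rest with
  | [] => days
  | q :: r => if q < p then days + 1 else scanB p r (days + 1)

-- `for i, p in enumerate(prices)` with the slice prices[i+1:]: structurally,
-- each element is paired with its own tail
def solution_alt (prices : List Int) : List Int :=
  match prices with
  | [] => []
  | p :: rest => scanB p rest 0 :: solution_alt rest

-- ===== PRECONDITION & SPEC =====
def Spec_solution (prices : List Int) (out : List Int) : Prop := out = solution_alt prices
instance (prices : List Int) (out : List Int) : Decidable (Spec_solution prices out) := by unfold Spec_solution; infer_instance

-- ===== CLAIM (what is proved, stated in full; the proofs are below) =====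
def Claim_equal_solution : Prop := ∀ (prices : List Int), Dom_solution prices → Spec_solution prices (solution prices)

-- ===== LEMMAS AND PROOFS =====

-- total indexing used by the specification-level invariants
def pget (l : List Int) (i : Nat) : Int := l.getD i 0

-- the intended value of answer[i]
def gval (prices : List Int) (i : Nat) : Int := scanB (pget prices i) (prices.drop (i + 1)) 0

-- no strictly lower price in positions (i, t)
def noDrop (prices : List Int) (i t : Nat) : Prop :=
  ∀ j, i < j → j < t → ¬ pget prices j < pget prices i

lemma getD_set (l : List Int) (k : Nat) (v : Int) (i : Nat) :
    (l.set k v).getD i 0 = if i = k ∧ k < l.length then v else l.getD i 0 := by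
  by_cases hik : i = k
  · subst hik
    by_cases hk : i < l.length
    · simp [List.getD_eq_getElem?_getD, hk]
    · simp [List.getD_eq_getElem?_getD, hk]
  · have hki : ¬ k = i := fun h => hik (h.symm)
    simp [List.getD_eq_getElem?_getD, List.getElem?_set, hik, hki]

lemma pget_drop (l : List Int) (m k : Nat) (h : m + k < l.length) :
    (l.drop m).getD k 0 = pget l (m + k) := by
  simp [pget, List.getD_eq_getElem?_getD, List.getElem?_drop]

lemma pget_of_drop_cons {l : List Int} {t : Nat} {p : Int} {r : List Int}
    (h : l.drop t = p :: r) : pget l t = p := by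
  have hlen : t < l.length := by
    by_contra hn
    simp [List.drop_eq_nil_of_le (Nat.le_of_not_lt hn)] at h
  have : l[t]? = (l.drop t)[0]? := by
    simp [List.getElem?_drop]
  simp [pget, List.getD_eq_getElem?_getD, this, h]

lemma scanB_noDrop (p : Int) (rest : List Int) :
    ∀ d, (∀ q ∈ rest, ¬ q < p) → scanB p rest d = d + rest.length := by
  induction rest with
  | nil => intro d _; simp [scanB]
  | cons q r ih =>
    intro d h
    have hq : ¬ q < p := h q (by simp)
    simp only [scanB, if_neg hq]
    rw [ih (d + 1) (fun x hx => h x (by simp [hx]))]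
    simp
    ring

lemma scanB_drop (p : Int) (rest : List Int) :
    ∀ d k, k < rest.length → rest.getD k 0 < p → (∀ j, j < k → ¬ rest.getD j 0 < p) →
      scanB p rest d = d + (k : Int) + 1 := by
  induction rest with
  | nil => intro d k hk; simp at hk
  | cons q r ih =>
    intro d k hk hdrop hbefore
    cases k with
    | zero =>
      simp only [List.getD_cons_zero] at hdrop
      simp [scanB, hdrop]
    | succ k' =>
      have hq : ¬ q < p := by simpa using hbefore 0 (Nat.zero_lt_succ _)
      simp only [scanB, if_neg hq]
      rw [ih (d + 1) k' (by simpa using hk) (by simpa using hdrop)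
        (fun j hj => by simpa using hbefore (j + 1) (by omega))]
      push_cast
      ring

lemma gval_of_drop (prices : List Int) (i t : Nat) (hit : i < t) (ht : t < prices.length)
    (hnd : noDrop prices i t) (hlt : pget prices t < pget prices i) :
    gval prices i = (t : Int) - (i : Int) := by
  have hlen : (prices.drop (i + 1)).length = prices.length - (i + 1) := by simp
  have hk : t - i - 1 < (prices.drop (i + 1)).length := by omega
  have hdropval : (prices.drop (i + 1)).getD (t - i - 1) 0 = pget prices t := by
    have := pget_drop prices (i + 1) (t - i - 1) (by omega)
    rwa [show i + 1 + (t - i - 1) = t by omega] at this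
  have hbefore : ∀ j, j < t - i - 1 → ¬ (prices.drop (i + 1)).getD j 0 < pget prices i := by
    intro j hj
    have := pget_drop prices (i + 1) j (by omega)
    rw [this]
    exact hnd (i + 1 + j) (by omega) (by omega)
  have := scanB_drop (pget prices i) (prices.drop (i + 1)) 0 (t - i - 1)
    hk (by rw [hdropval]; exact hlt) hbefore
  unfold gval
  rw [this]
  have : ((t - i - 1 : Nat) : Int) = (t : Int) - i - 1 := by omega
  rw [this]; ring

lemma gval_of_noDrop (prices : List Int) (i : Nat) (hi : i < prices.length)
    (hnd : noDrop prices i prices.length) :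
    gval prices i = (prices.length : Int) - 1 - (i : Int) := by
  have hall : ∀ q ∈ prices.drop (i + 1), ¬ q < pget prices i := by
    intro q hq
    obtain ⟨k, hk, rfl⟩ := List.mem_iff_getElem.mp hq
    have hk' : i + 1 + k < prices.length := by
      have := hk; simp at this; omega
    have : (prices.drop (i + 1))[k] = (prices.drop (i + 1)).getD k 0 := by
      simp [List.getD_eq_getElem?_getD, List.getElem?_eq_getElem hk]
    rw [this, pget_drop prices (i + 1) k hk']
    exact hnd (i + 1 + k) (by omega) hk'
  unfold gval
  rw [scanB_noDrop _ _ 0 hall]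
  have : ((prices.drop (i + 1)).length : Int) = (prices.length : Int) - 1 - i := by
    simp; omega
  rw [this]; ring

lemma alt_length (prices : List Int) : (solution_alt prices).length = prices.length := by
  induction prices with
  | nil => simp [solution_alt]
  | cons p r ih => simp [solution_alt, ih]

lemma alt_getD (prices : List Int) : ∀ i, i < prices.length →
    (solution_alt prices).getD i 0 = gval prices i := by
  induction prices with
  | nil => intro i hi; simp at hi
  | cons p r ih =>
    intro i hi
    cases i with
    | zero => simp [solution_alt, gval, pget]
    | succ j =>
      simp only [solution_alt, List.getD_cons_succ]
      rw [ih j (by simpa using hi)]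
      simp [gval, pget]

-- invariant through the inner while-loop
lemma popLoop_inv (prices : List Int) (t : Nat) (p : Int)
    (ht : t < prices.length) (hp : p = pget prices t) :
    ∀ (stack : List (Nat × Int)) (answer : List Int),
    answer.length = prices.length →
    (∀ x ∈ stack, x.1 < t ∧ x.2 = pget prices x.1 ∧ noDrop prices x.1 t) →
    stack.Pairwise (fun a b => b.1 < a.1 ∧ b.2 ≤ a.2) →
    (∀ i, i < t → (∀ x ∈ stack, x.1 ≠ i) → answer.getD i 0 = gval prices i) →
    (popLoop stack answer t p).2.length = prices.length ∧
    (∀ x ∈ (popLoop stack answer t p).1,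
        x.1 < t ∧ x.2 = pget prices x.1 ∧ noDrop prices x.1 (t + 1) ∧ x.2 ≤ p) ∧
    (popLoop stack answer t p).1.Pairwise (fun a b => b.1 < a.1 ∧ b.2 ≤ a.2) ∧
    (∀ i, i < t → (∀ x ∈ (popLoop stack answer t p).1, x.1 ≠ i) →
        (popLoop stack answer t p).2.getD i 0 = gval prices i) := by
  intro stack
  induction stack with
  | nil =>
    intro answer hlen _ _ hans
    refine ⟨hlen, by simp [popLoop], by simp [popLoop], ?_⟩
    intro i hi _
    exact hans i hi (by simp)
  | cons hd rest ih =>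
    obtain ⟨pt, pp⟩ := hd
    intro answer hlen hmem hpw hans
    by_cases hcmp : p < pp
    · -- pop (pt, pp), write answer[pt] := t - pt, continue
      have hpt : pt < t := (hmem (pt, pp) (by simp)).1
      have hppval : pp = pget prices pt := (hmem (pt, pp) (by simp)).2.1
      have hnd : noDrop prices pt t := (hmem (pt, pp) (by simp)).2.2
      have hrec := ih (answer.set pt ((t : Int) - (pt : Int)))
        (by simp [hlen])
        (fun x hx => hmem x (by simp [hx]))
        (List.Pairwise.of_cons hpw)
        ?_
      · simpa [popLoop, if_pos hcmp] using hrec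
      · intro i hi hnot
        rw [getD_set]
        by_cases hipt : i = pt
        · subst hipt
          rw [if_pos ⟨rfl, by omega⟩]
          rw [gval_of_drop prices i t hpt ht hnd (by rw [← hp, ← hppval]; exact hcmp)]
        · rw [if_neg (by tauto)]
          refine hans i hi ?_
          intro x hx
          rcases (List.mem_cons.mp hx) with h1 | h2
          · subst h1; exact fun he => hipt he.symm
          · exact hnot x h2
    · -- stop: stack unchanged; every remaining price ≤ p
      have hle : ∀ x ∈ (pt, pp) :: rest, x.2 ≤ p := by
        intro x hx
        rcases List.mem_cons.mp hx with h1 | h2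
        · subst h1; omega
        · have := (List.pairwise_cons.mp hpw).1 x h2
          omega
      have hres : popLoop ((pt, pp) :: rest) answer t p = ((pt, pp) :: rest, answer) := by
        simp [popLoop, hcmp]
      rw [hres]
      refine ⟨hlen, ?_, hpw, ?_⟩
      · intro x hx
        obtain ⟨h1, h2, h3⟩ := hmem x hx
        refine ⟨h1, h2, ?_, hle x hx⟩
        intro j hj1 hj2
        by_cases hjt : j = t
        · subst hjt
          rw [← hp, ← h2]
          have := hle x hx
          omega
        · exact h3 j hj1 (by omega)
      · intro i hi hnot
        exact hans i hi hnot

-- invariant through the outer for-loop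
lemma aloop_inv (prices : List Int) :
    ∀ (rem : List Int) (t : Nat) (stack : List (Nat × Int)) (answer : List Int),
    rem = prices.drop t →
    answer.length = prices.length →
    (∀ x ∈ stack, x.1 < t ∧ x.1 < prices.length ∧ x.2 = pget prices x.1 ∧ noDrop prices x.1 t) →
    stack.Pairwise (fun a b => b.1 < a.1 ∧ b.2 ≤ a.2) →
    (∀ i, i < t → (∀ x ∈ stack, x.1 ≠ i) → answer.getD i 0 = gval prices i) →
    (aloop t rem stack answer).2.length = prices.length ∧
    (∀ x ∈ (aloop t rem stack answer).1,
        x.1 < prices.length ∧ noDrop prices x.1 prices.length) ∧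
    (∀ i, i < prices.length → (∀ x ∈ (aloop t rem stack answer).1, x.1 ≠ i) →
        (aloop t rem stack answer).2.getD i 0 = gval prices i) := by
  intro rem
  induction rem with
  | nil =>
    intro t stack answer hdrop hlen hmem _ hans
    have hnt : prices.length ≤ t := by
      by_contra hn
      have := congrArg List.length hdrop
      simp at this
      omega
    refine ⟨hlen, ?_, ?_⟩
    · intro x hx
      obtain ⟨_, h2, _, h4⟩ := hmem x (by simpa [aloop] using hx)
      exact ⟨h2, fun j hj1 hj2 => h4 j hj1 (by omega)⟩
    · intro i hi hnot
      exact hans i (by omega) (by simpa [aloop] using hnot)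
  | cons p rem' ih =>
    intro t stack answer hdrop hlen hmem hpw hans
    have ht : t < prices.length := by
      by_contra hn
      rw [List.drop_eq_nil_of_le (Nat.le_of_not_lt hn)] at hdrop
      exact (List.cons_ne_nil p rem') hdrop
    have hp : p = pget prices t := (pget_of_drop_cons hdrop.symm).symm
    have hrem' : rem' = prices.drop (t + 1) := by
      have h1 : prices.drop (t + 1) = (prices.drop t).tail := by
        rw [← List.drop_drop]; simp
      rw [h1, ← hdrop]
      rfl
    have hpop := popLoop_inv prices t p ht hp stack answer hlen
      (fun x hx => ⟨(hmem x hx).1, (hmem x hx).2.2.1, (hmem x hx).2.2.2⟩) hpw hans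
    obtain ⟨hlen', hmem', hpw', hans'⟩ := hpop
    have hstep := ih (t + 1) ((t, p) :: (popLoop stack answer t p).1)
      (popLoop stack answer t p).2 hrem' hlen' ?_ ?_ ?_
    · simpa [aloop] using hstep
    · intro x hx
      rcases List.mem_cons.mp hx with h1 | h2
      · subst h1
        exact ⟨by omega, ht, hp, fun j hj1 hj2 => absurd hj1 (by omega)⟩
      · obtain ⟨h1, h2, h3, _⟩ := hmem' x h2
        exact ⟨by omega, by omega, h2, h3⟩
    · rw [List.pairwise_cons]
      exact ⟨fun x hx => ⟨(hmem' x hx).1, (hmem' x hx).2.2.2⟩, hpw'⟩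
    · intro i hi hnot
      have hit : i ≠ t := fun he => (hnot (t, p) (by simp)) (by rw [he])
      exact hans' i (by omega) (fun x hx => hnot x (by simp [hx]))

-- the final `for time, _ in stack` write-back loop
lemma finalFold (prices : List Int) :
    ∀ (l : List (Nat × Int)) (answer : List Int),
    answer.length = prices.length →
    (∀ x ∈ l, x.1 < prices.length ∧ gval prices x.1 = (prices.length : Int) - 1 - (x.1 : Int)) →
    (∀ i, i < prices.length → (∀ x ∈ l, x.1 ≠ i) → answer.getD i 0 = gval prices i) →
    (l.foldl (fun a x => a.set x.1 ((prices.length : Int) - 1 - (x.1 : Int))) answer).length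
      = prices.length ∧
    (∀ i, i < prices.length →
      (l.foldl (fun a x => a.set x.1 ((prices.length : Int) - 1 - (x.1 : Int))) answer).getD i 0
        = gval prices i) := by
  intro l
  induction l with
  | nil =>
    intro answer hlen _ hans
    exact ⟨hlen, fun i hi => hans i hi (by simp)⟩
  | cons hd tl ih =>
    obtain ⟨i0, q⟩ := hd
    intro answer hlen hmem hans
    have hi0 : i0 < prices.length := (hmem (i0, q) (by simp)).1
    have hg0 : gval prices i0 = (prices.length : Int) - 1 - (i0 : Int) :=
      (hmem (i0, q) (by simp)).2
    simp only [List.foldl_cons]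
    refine ih (answer.set i0 ((prices.length : Int) - 1 - (i0 : Int)))
      (by simp [hlen]) (fun x hx => hmem x (by simp [hx])) ?_
    intro i hi hnot
    rw [getD_set]
    by_cases hii : i = i0
    · subst hii
      rw [if_pos ⟨rfl, by omega⟩, hg0]
    · rw [if_neg (by tauto)]
      refine hans i hi ?_
      intro x hx
      rcases List.mem_cons.mp hx with h1 | h2
      · subst h1; exact fun he => hii he.symm
      · exact hnot x h2

lemma lists_eq_of_getD (a b : List Int) (hlen : a.length = b.length)
    (h : ∀ i, i < a.length → a.getD i 0 = b.getD i 0) : a = b := by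
  apply List.ext_getElem hlen
  intro i h1 h2
  have := h i h1
  simpa [List.getD_eq_getElem?_getD, List.getElem?_eq_getElem, h1, h2] using this

-- ===== VERDICT (by name: the statement is the Claim_ definition above) =====
theorem solution_spec : Claim_equal_solution := by
  intro prices _
  unfold Spec_solution
  obtain ⟨hlen, hmem, hans⟩ := aloop_inv prices prices 0 []
    (List.replicate prices.length (0 : Int)) (by simp) (by simp) (by simp) (by simp)
    (fun i hi => absurd hi (by omega))
  have hfin := finalFold prices (aloop 0 prices [] (List.replicate prices.length (0 : Int))).1.reverse
    (aloop 0 prices [] (List.replicate prices.length (0 : Int))).2 hlen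
    (fun x hx =>
      ⟨(hmem x (List.mem_reverse.mp hx)).1,
       gval_of_noDrop prices x.1 (hmem x (List.mem_reverse.mp hx)).1
         (hmem x (List.mem_reverse.mp hx)).2⟩)
    (fun i hi hnot => hans i hi (fun x hx => hnot x (List.mem_reverse.mpr hx)))
  have hsol : solution prices
      = (aloop 0 prices [] (List.replicate prices.length (0 : Int))).1.reverse.foldl
          (fun a x => a.set x.1 ((prices.length : Int) - 1 - (x.1 : Int)))
          (aloop 0 prices [] (List.replicate prices.length (0 : Int))).2 := rfl
  rw [hsol]
  refine lists_eq_of_getD _ _ (by rw [hfin.1, alt_length]) ?_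
  intro i hi
  rw [hfin.1] at hi
  rw [hfin.2 i hi, alt_getD prices i hi]
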